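-- pv_equiv track=rewrite | github.com/Maha-Kefi12/Chorus | spring-ftl/src/main/resources/scripts/combined.py | group_fields_by_area
-- ===== SOURCE A (Python) =====
-- def group_fields_by_area(mapped_fields):
--     """Group fields by area"""
--     area_fields = {'area1': [], 'area2': [], 'area3': []}
--     for field in mapped_fields.values():
--         area = field.get('area', 'area1')
--         if area not in area_fields:
--             area_fields[area] = []
--         area_fields[area].append(field)
--
--     # Sort by sortNumber within each area
--     for area in area_fields:
--         area_fields[area].sort(key=lambda x: int(x.get('sortNumber', 0)))
--
--     return area_fields
-- ===== SOURCE B (Python) =====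
-- def group_fields_by_area(mapped_fields):
--     """Group fields by area"""
--     fields = list(mapped_fields.values())
--     # key order: the three seeded areas, then new areas in first-occurrence order
--     order = ['area1', 'area2', 'area3']
--     for f in fields:
--         a = f.get('area', 'area1')
--         if a not in order:
--             order.append(a)
--     # each bucket is computed directly: filter the fields of that area, sort once
--     return {a: sorted((f for f in fields if f.get('area', 'area1') == a),
--                       key=lambda x: int(x.get('sortNumber', 0)))
--             for a in order}
-- ===== Notes on version B (the rewrite author's own statement) =====
-- stated objective: alternative
-- what changed: B never mutates per-area buckets: it computes the key order first, then builds the whole result as a dict comprehension that, for each area, filters the field list and sorts that filtered list once, instead of A's append-into-dict pass followed by a per-bucket in-place sort.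
import Mathlib
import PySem

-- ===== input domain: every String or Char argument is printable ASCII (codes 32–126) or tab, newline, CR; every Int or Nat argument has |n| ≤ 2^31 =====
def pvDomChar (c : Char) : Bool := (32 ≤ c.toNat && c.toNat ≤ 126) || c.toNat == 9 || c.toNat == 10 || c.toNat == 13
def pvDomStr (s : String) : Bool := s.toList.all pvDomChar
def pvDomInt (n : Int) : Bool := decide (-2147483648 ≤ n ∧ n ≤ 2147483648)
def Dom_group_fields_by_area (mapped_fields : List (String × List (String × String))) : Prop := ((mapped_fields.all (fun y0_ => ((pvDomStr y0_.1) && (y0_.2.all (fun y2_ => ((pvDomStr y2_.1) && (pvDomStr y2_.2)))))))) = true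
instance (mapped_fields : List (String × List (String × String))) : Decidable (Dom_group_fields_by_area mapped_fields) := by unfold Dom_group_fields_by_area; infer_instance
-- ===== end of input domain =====

-- B replaces A's mutate-buckets-then-sort-each-bucket loop by computing the key order first and
-- building the result as a dict comprehension of filter-then-sort per area (objective: alternative).

-- ===== PORT A =====
-- field.get('area', 'area1')
def pvArea (f : List (String × String)) : String :=
  (PySem.Dict.ofList f).getD "area" "area1"

-- int(x.get('sortNumber', 0)); the default 0 is already an int. Pre_ guarantees the
-- parse succeeds, so the .getD 0 totalisation is never reached on admitted inputs.
def pvKey (f : List (String × String)) : Int :=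
  match (PySem.Dict.ofList f).get? "sortNumber" with
  | none => 0
  | some s => (PySem.Int.ofStr? s).getD 0

-- {'area1': [], 'area2': [], 'area3': []}
def pvInit : PySem.Dict String (List (List (String × String))) :=
  PySem.Dict.ofList [("area1", []), ("area2", []), ("area3", [])]

def group_fields_by_area (mapped_fields : List (String × List (String × String))) : List (String × List (List (String × String))) :=
  let fields := (PySem.Dict.ofList mapped_fields).values
  -- for field in mapped_fields.values(): bucket it (create the bucket if absent)
  let d := fields.foldl (fun d f =>
      let area := pvArea f
      let d := if d.contains area then d else d.insert area []
      -- area_fields[area].append(field)  (in-place append = modify of a present key)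
      d.modify area [] (fun v => v ++ [f])) pvInit
  -- for area in area_fields: area_fields[area].sort(key=...)  (in-place stable sort)
  let d := d.keys.foldl (fun d a => d.modify a [] (fun v => PySem.List.sorted v pvKey false)) d
  d.items

-- ===== PORT B =====
def group_fields_by_area_alt (mapped_fields : List (String × List (String × String))) : List (String × List (List (String × String))) :=
  let fields := (PySem.Dict.ofList mapped_fields).values
  -- order = ['area1','area2','area3']; for f in fields: append f.get('area','area1') if absent
  let order := fields.foldl
      (fun o f => if o.contains (pvArea f) then o else o ++ [pvArea f])
      ["area1", "area2", "area3"]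
  -- {a: sorted([f for f in fields if area(f) == a], key=...) for a in order}
  (order.foldl (fun d a =>
      d.insert a (PySem.List.sorted (fields.filter (fun f => pvArea f == a)) pvKey false))
    PySem.Dict.empty).items

-- ===== PRECONDITION & SPEC =====
-- Pre_ excludes exactly the inputs on which Python A raises ValueError: a field whose
-- 'sortNumber' value does not parse as int.
def Pre_group_fields_by_area (mapped_fields : List (String × List (String × String))) : Prop :=
  ∀ f ∈ (PySem.Dict.ofList mapped_fields).values,
    (((PySem.Dict.ofList f).get? "sortNumber").all (fun s => (PySem.Int.ofStr? s).isSome)) = true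
instance (mapped_fields : List (String × List (String × String))) : Decidable (Pre_group_fields_by_area mapped_fields) := by unfold Pre_group_fields_by_area; infer_instance

def pvWitness_group_fields_by_area : (List (String × List (String × String))) :=
  [("f1", [("area", "area2"), ("sortNumber", "2")]), ("f2", []), ("f3", [("area", "x"), ("sortNumber", "-1")])]

def Spec_group_fields_by_area (mapped_fields : List (String × List (String × String))) (out : List (String × List (List (String × String)))) : Prop := out = group_fields_by_area_alt mapped_fields
instance (mapped_fields : List (String × List (String × String))) (out : List (String × List (List (String × String)))) : Decidable (Spec_group_fields_by_area mapped_fields out) := by unfold Spec_group_fields_by_area; infer_instance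

-- ===== CLAIM (what is proved, stated in full; the proofs are below) =====
def Claim_equal_group_fields_by_area : Prop := ∀ (mapped_fields : List (String × List (String × String))), Dom_group_fields_by_area mapped_fields → Pre_group_fields_by_area mapped_fields → Spec_group_fields_by_area mapped_fields (group_fields_by_area mapped_fields)

-- ===== LEMMAS AND PROOFS =====

-- A's loop step (create-if-absent, then append) is one dict `modify`.
theorem pvStep_eq (d : PySem.Dict String (List (List (String × String)))) (f : List (String × String)) :
    ((if d.contains (pvArea f) then d else d.insert (pvArea f) []).modify (pvArea f) [] (fun v => v ++ [f]))
      = d.modify (pvArea f) [] (fun v => v ++ [f]) := by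
  by_cases h : d.contains (pvArea f)
  · simp [h]
  · simp only [h, Bool.false_eq_true, if_false]
    simp [PySem.Dict.modify, PySem.Dict.insert_insert_self,
      PySem.Dict.getD_insert_self, PySem.Dict.getD_of_not_contains _ _ (by simpa using h)]

theorem pvFoldA_eq (l : List (List (String × String))) (d : PySem.Dict String (List (List (String × String)))) :
    l.foldl (fun d f =>
      let area := pvArea f
      let d := if d.contains area then d else d.insert area []
      d.modify area [] (fun v => v ++ [f])) d
    = l.foldl (fun d f => d.modify (pvArea f) [] (fun v => v ++ [f])) d := by
  induction l generalizing d with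
  | nil => rfl
  | cons f t ih =>
    simp only [List.foldl_cons]
    rw [show (let area := pvArea f
        let d' := if d.contains area then d else d.insert area []
        d'.modify area [] (fun v => v ++ [f])) = d.modify (pvArea f) [] (fun v => v ++ [f]) from
      pvStep_eq d f]
    exact ih _

-- getD after the append loop
theorem pvGetD_fold_append (l : List (List (String × String))) (d : PySem.Dict String (List (List (String × String)))) (a : String) :
    (l.foldl (fun d f => d.modify (pvArea f) [] (fun v => v ++ [f])) d).getD a []
      = d.getD a [] ++ l.filter (fun f => pvArea f == a) := by
  induction l generalizing d with
  | nil => simp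
  | cons f t ih =>
    simp only [List.foldl_cons, ih, List.filter_cons]
    by_cases h : pvArea f = a
    · simp [h]
    · simp [PySem.Dict.getD_modify, h, Ne.symm h, beq_iff_eq]

-- A's sort loop over a Nodup key list
theorem pvGetD_fold_sortloop (g : List (List (String × String)) → List (List (String × String)))
    (ks : List String) (hnd : ks.Nodup) (d : PySem.Dict String (List (List (String × String)))) (a : String) :
    (ks.foldl (fun d x => d.modify x [] g) d).getD a []
      = if a ∈ ks then g (d.getD a []) else d.getD a [] := by
  induction ks generalizing d with
  | nil => simp
  | cons x t ih =>
    simp only [List.foldl_cons, ih (List.Nodup.of_cons hnd), List.mem_cons]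
    by_cases hat : a ∈ t
    · have hax : a ≠ x := by rintro rfl; exact (List.nodup_cons.1 hnd).1 hat
      simp [hat, hax, PySem.Dict.getD_modify]
    · by_cases hax : a = x
      · subst hax; simp [hat]
      · simp [hat, hax, PySem.Dict.getD_modify]

theorem pvSet_update_of_subset {s l : List String} (h : ∀ x ∈ l, x ∈ s) :
    PySem.Set.update s l = s := by
  induction l with
  | nil => rfl
  | cons x t ih =>
    simp only [PySem.Set.update, List.foldl_cons] at *
    have : PySem.Set.add s x = s := by
      simp [PySem.Set.add, h x (by simp)]
    rw [this]; exact ih (fun y hy => h y (by simp [hy]))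

theorem pvNodup_set_update {s l : List String} (h : s.Nodup) :
    (PySem.Set.update s l).Nodup := by
  induction l generalizing s with
  | nil => exact h
  | cons x t ih =>
    simp only [PySem.Set.update, List.foldl_cons]
    apply ih
    by_cases hm : x ∈ s
    · simpa [PySem.Set.add, List.contains_iff_mem, hm]
    · rw [show PySem.Set.add s x = s ++ [x] from by simp [PySem.Set.add, PySem.Set.contains, hm]]
      simp only [List.nodup_append, List.nodup_singleton, true_and]
      refine ⟨h, ?_⟩
      intro a ha b hb
      simp only [List.mem_singleton] at hb
      subst hb
      intro hax
      exact hm (hax ▸ ha)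

theorem pvInit_getD (a : String) : pvInit.getD a [] = [] := by
  rw [PySem.Dict.getD_eq_get?_getD]
  cases hv : pvInit.get? a with
  | none => rfl
  | some v =>
    have hmem := PySem.Dict.mem_items_of_get?_eq_some _ hv
    have : pvInit.items = [("area1", []), ("area2", []), ("area3", [])] := by decide
    rw [this] at hmem
    simp at hmem
    rcases hmem with ⟨_, rfl⟩ | ⟨_, rfl⟩ | ⟨_, rfl⟩ <;> rfl

-- B's order loop IS the Set.update of the mapped area list
theorem pvOrder_eq_update (l : List (List (String × String))) (s : List String) :
    l.foldl (fun o f => if o.contains (pvArea f) then o else o ++ [pvArea f]) s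
      = PySem.Set.update s (l.map pvArea) := by
  induction l generalizing s with
  | nil => rfl
  | cons f t ih =>
    simp only [List.foldl_cons, List.map_cons, PySem.Set.update] at *
    rw [show (if s.contains (pvArea f) then s else s ++ [pvArea f]) = PySem.Set.add s (pvArea f) from by
      simp [PySem.Set.add, PySem.Set.contains]]
    exact ih _

-- the assembled equivalence, for an arbitrary field list
theorem pvMain (fs : List (List (String × String))) :
    (let d := fs.foldl (fun d f =>
        let area := pvArea f
        let d := if d.contains area then d else d.insert area []
        d.modify area [] (fun v => v ++ [f])) pvInit
      let d := d.keys.foldl (fun d a => d.modify a [] (fun v => PySem.List.sorted v pvKey false)) d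
      d.items)
    = ((fs.foldl (fun o f => if o.contains (pvArea f) then o else o ++ [pvArea f])
          ["area1", "area2", "area3"]).foldl
        (fun d a => d.insert a (PySem.List.sorted (fs.filter (fun f => pvArea f == a)) pvKey false))
        PySem.Dict.empty).items := by
  simp only [pvFoldA_eq]
  have hndinit : pvInit.keys.Nodup := PySem.Dict.nodup_keys_ofList _
  set dA := fs.foldl (fun d f => d.modify (pvArea f) [] (fun v => v ++ [f])) pvInit with hdA
  set K := PySem.Set.update pvInit.keys (fs.map pvArea) with hK
  have hndK : K.Nodup := by rw [hK]; exact pvNodup_set_update hndinit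
  have hkA : dA.keys = K := by
    rw [hdA, hK]; exact PySem.Dict.keys_foldl_modify_key fs pvArea [] (fun _ f => fun v => v ++ [f]) pvInit
  have hndA : dA.keys.Nodup := by rw [hkA]; exact hndK
  have hgA : ∀ a, dA.getD a [] = fs.filter (fun f => pvArea f == a) := by
    intro a; rw [hdA, pvGetD_fold_append, pvInit_getD, List.nil_append]
  -- A side
  set d2 := dA.keys.foldl (fun d a => d.modify a [] (fun v => PySem.List.sorted v pvKey false)) dA with hd2
  have hk2 : d2.keys = K := by
    rw [hd2, PySem.Dict.keys_foldl_modify dA.keys [] (fun _ _ => fun v => PySem.List.sorted v pvKey false) dA,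
      pvSet_update_of_subset (fun x hx => hx), hkA]
  have hnd2 : d2.keys.Nodup := by rw [hk2]; exact hndK
  have hg2 : ∀ a ∈ K, d2.getD a [] = PySem.List.sorted (fs.filter (fun f => pvArea f == a)) pvKey false := by
    intro a ha
    rw [hd2, pvGetD_fold_sortloop _ _ hndA, if_pos (hkA ▸ ha), hgA]
  -- B side
  have horder : fs.foldl (fun o f => if o.contains (pvArea f) then o else o ++ [pvArea f])
      ["area1", "area2", "area3"] = K := by
    rw [pvOrder_eq_update, hK]
    rfl
  rw [horder,
    PySem.Dict.items_foldl_insert_fresh (k := fun a => a)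
      (v := fun a => PySem.List.sorted (fs.filter (fun f => pvArea f == a)) pvKey false)
      (d := PySem.Dict.empty) (l := K)
      (fun a _ => PySem.Dict.contains_empty a) (by simpa using hndK),
    PySem.Dict.items_eq_map_keys d2 hnd2 [], hk2]
  simp only [PySem.Dict.empty, List.nil_append]
  exact List.map_congr_left (fun a ha => by rw [hg2 a ha])

-- ===== VERDICT (by name: the statement is the Claim_ definition above) =====
theorem group_fields_by_area_spec : Claim_equal_group_fields_by_area := by
  intro mf _ _
  unfold Spec_group_fields_by_area group_fields_by_area group_fields_by_area_alt
  exact pvMain ((PySem.Dict.ofList mf).values)
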